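-- pv_equiv track=rewrite | github.com/SimeonHristov99/aoc_2023 | aoc_2023/day10/main.py | determine_side
-- ===== SOURCE A (Python) =====
-- from typing import List, Optional, Set, Tuple
--
-- def to_differences(
--     loop_coords: List[Tuple[int, int]]
-- ) -> List[Tuple[Tuple[int, int], Tuple[int, int], Tuple[int, int]]]:
--     loop_coords += [loop_coords[0]]
--     return [(p1, p2, (p2[0] - p1[0], p2[1] - p1[1]))
--             for p1, p2 in zip(loop_coords, loop_coords[1:])]
--
-- def determine_side(loop_coords: List[Tuple[int, int]]) -> str:
--     num_turns_right = 0
--     num_turns_left = 0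
--     current_direction = 'right'
--     for _, _, diff in to_differences(loop_coords):
--         if current_direction == 'right' and diff == (1, 0):
--             num_turns_right += 1
--             current_direction = 'down'
--         elif current_direction == 'right' and diff == (-1, 0):
--             num_turns_left += 1
--             current_direction = 'up'
--         elif current_direction == 'down' and diff == (0, -1):
--             num_turns_right += 1
--             current_direction = 'left'
--         elif current_direction == 'down' and diff == (0, 1):
--             num_turns_left += 1
--             current_direction = 'right'
--         elif current_direction == 'left' and diff == (-1, 0):
--             num_turns_right += 1
--             current_direction = 'up'
--         elif current_direction == 'left' and diff == (1, 0):
--             num_turns_left += 1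
--             current_direction = 'down'
--         elif current_direction == 'up' and diff == (0, 1):
--             num_turns_right += 1
--             current_direction = 'right'
--         elif current_direction == 'up' and diff == (0, -1):
--             num_turns_left += 1
--             current_direction = 'left'
--
--     return 'left' if num_turns_left > num_turns_right else 'right'
-- ===== SOURCE B (Python) =====
-- def determine_side(loop_coords):
--     closed = loop_coords + [loop_coords[0]]
--     units = ((0, 1), (1, 0), (0, -1), (-1, 0))
--     diffs = [(q[0] - p[0], q[1] - p[1]) for p, q in zip(closed, closed[1:])]
--     moves = [d for d in diffs if d in units]
--     turns = [(0, 1)]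
--     for d in moves:
--         if (d[0] != 0) != (turns[-1][0] != 0):
--             turns.append(d)
--     balance = sum(u[0] * v[1] - u[1] * v[0] for u, v in zip(turns, turns[1:]))
--     return 'left' if balance > 0 else 'right'
-- ===== Notes on version B (the rewrite author's own statement) =====
-- stated objective: alternative
-- what changed: Replaces the single-pass 8-branch string-state machine by a staged pipeline: build the diff list, filter to unit steps, collapse it to the axis-alternating turn subsequence seeded with (0,1), then sum cross products over adjacent pairs and compare the balance with 0; A's in-place append to loop_coords is dropped (return-value equivalence only).
import Mathlib
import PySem

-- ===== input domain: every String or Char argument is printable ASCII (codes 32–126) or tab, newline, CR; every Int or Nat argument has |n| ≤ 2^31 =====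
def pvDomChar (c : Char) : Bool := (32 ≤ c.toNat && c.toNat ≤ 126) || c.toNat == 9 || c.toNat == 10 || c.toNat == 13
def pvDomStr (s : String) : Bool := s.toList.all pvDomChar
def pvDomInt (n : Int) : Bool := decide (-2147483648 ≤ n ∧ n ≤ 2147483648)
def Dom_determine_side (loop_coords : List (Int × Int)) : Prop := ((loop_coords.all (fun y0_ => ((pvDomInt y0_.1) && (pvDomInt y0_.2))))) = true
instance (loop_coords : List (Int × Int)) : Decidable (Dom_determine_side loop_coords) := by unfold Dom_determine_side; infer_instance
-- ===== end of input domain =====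

-- B replaces A's single-pass 8-branch string-state machine by a staged pipeline
-- (diffs → unit filter → axis-alternating collapse → sum of adjacent cross products);
-- A mutates loop_coords in place (+= [first]), B does not — the equivalence proved
-- here is about the return value only.

-- ===== PORT A =====
-- loop_coords[0] → pyGet?; none = IndexError (excluded by Pre_); loop_coords[1:] → slice
def to_differences (loop_coords : List (Int × Int)) :
    List ((Int × Int) × (Int × Int) × (Int × Int)) :=
  match PySem.List.pyGet? loop_coords 0 with
  | none => []   -- Python raises IndexError here
  | some h =>
    let l2 := loop_coords ++ [h]
    (List.zip l2 (PySem.List.slice l2 (some 1) none)).map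
      (fun pq => (pq.1, pq.2, (pq.2.1 - pq.1.1, pq.2.2 - pq.1.2)))

-- the body of A's for-loop on the diff component (the only one it reads),
-- state = (num_turns_right, num_turns_left, current_direction)
def aStepD (s : Int × Int × String) (diff : Int × Int) : Int × Int × String :=
  if s.2.2 = "right" ∧ diff = (1, 0) then (s.1 + 1, s.2.1, "down")
  else if s.2.2 = "right" ∧ diff = (-1, 0) then (s.1, s.2.1 + 1, "up")
  else if s.2.2 = "down" ∧ diff = (0, -1) then (s.1 + 1, s.2.1, "left")
  else if s.2.2 = "down" ∧ diff = (0, 1) then (s.1, s.2.1 + 1, "right")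
  else if s.2.2 = "left" ∧ diff = (-1, 0) then (s.1 + 1, s.2.1, "up")
  else if s.2.2 = "left" ∧ diff = (1, 0) then (s.1, s.2.1 + 1, "down")
  else if s.2.2 = "up" ∧ diff = (0, 1) then (s.1 + 1, s.2.1, "right")
  else if s.2.2 = "up" ∧ diff = (0, -1) then (s.1, s.2.1 + 1, "left")
  else s

def aStep (s : Int × Int × String) (t : (Int × Int) × (Int × Int) × (Int × Int)) :
    Int × Int × String := aStepD s t.2.2

def determine_side (loop_coords : List (Int × Int)) : String :=
  let st := (to_differences loop_coords).foldl aStep (0, 0, "right")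
  if st.2.1 > st.1 then "left" else "right"

-- ===== PORT B =====
def bCross (u v : Int × Int) : Int := u.1 * v.2 - u.2 * v.1

def isUnit (d : Int × Int) : Bool :=
  d == (0, 1) || d == (1, 0) || d == (0, -1) || d == (-1, 0)

-- the body of B's collapse loop: turns[-1] → pyGet? turns (-1)
def collapseStep (turns : List (Int × Int)) (d : Int × Int) : List (Int × Int) :=
  match PySem.List.pyGet? turns (-1) with
  | none => turns   -- unreachable: turns starts nonempty and only grows
  | some last => if (d.1 != 0) != (last.1 != 0) then turns ++ [d] else turns

def determine_side_alt (loop_coords : List (Int × Int)) : String :=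
  match PySem.List.pyGet? loop_coords 0 with
  | none => "right"   -- Python raises IndexError here (excluded by Pre_)
  | some h =>
    let closed := loop_coords ++ [h]
    let diffs := (List.zip closed (PySem.List.slice closed (some 1) none)).map
      (fun pq => (pq.2.1 - pq.1.1, pq.2.2 - pq.1.2))
    let moves := diffs.filter isUnit
    let turns := moves.foldl collapseStep [((0 : Int), (1 : Int))]
    let balance := ((List.zip turns (PySem.List.slice turns (some 1) none)).map
      (fun uv => bCross uv.1 uv.2)).sum
    if balance > 0 then "left" else "right"

-- ===== PRECONDITION & SPEC =====
-- A raises IndexError on the empty list (loop_coords[0]); excluded.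
def Pre_determine_side (loop_coords : List (Int × Int)) : Prop := loop_coords ≠ []
instance (loop_coords : List (Int × Int)) : Decidable (Pre_determine_side loop_coords) := by
  unfold Pre_determine_side; infer_instance

def pvWitness_determine_side : (List (Int × Int)) :=
  [(0, 0), (0, 1), (1, 1), (1, 0)]

def Spec_determine_side (loop_coords : List (Int × Int)) (out : String) : Prop :=
  out = determine_side_alt loop_coords
instance (loop_coords : List (Int × Int)) (out : String) : Decidable (Spec_determine_side loop_coords out) := by
  unfold Spec_determine_side; infer_instance

-- ===== CLAIM (what is proved, stated in full; the proofs are below) =====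
def Claim_equal_determine_side : Prop := ∀ (loop_coords : List (Int × Int)), Dom_determine_side loop_coords → Pre_determine_side loop_coords → Spec_determine_side loop_coords (determine_side loop_coords)

-- ===== LEMMAS AND PROOFS =====

-- adjacent-pair cross sum, recursive form used by the proofs
def adjSum : List (Int × Int) → Int
  | u :: v :: rest => bCross u v + adjSum (v :: rest)
  | _ => 0

theorem adjSum_append (T : List (Int × Int)) (p : Int × Int)
    (hp : T.getLast? = some p) (d : Int × Int) :
    adjSum (T ++ [d]) = adjSum T + bCross p d := by
  induction T generalizing p with
  | nil => simp at hp
  | cons u rest ih =>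
    cases rest with
    | nil => simp at hp; subst hp; simp [adjSum]
    | cons v rest' =>
      rw [List.getLast?_cons_cons] at hp
      simp only [List.cons_append, adjSum] at ih ⊢
      rw [ih p hp]
      ring

def StInv (dir : String) (p : Int × Int) : Prop :=
  (dir = "right" ∧ p = (0, 1)) ∨ (dir = "down" ∧ p = (1, 0)) ∨
  (dir = "left" ∧ p = (0, -1)) ∨ (dir = "up" ∧ p = (-1, 0))

def bStep (T : List (Int × Int)) (d : Int × Int) : List (Int × Int) :=
  if isUnit d then collapseStep T d else T

set_option maxHeartbeats 2000000 in
theorem step_ok (r l : Int) (dir : String) (T : List (Int × Int)) (p : Int × Int)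
    (hp : T.getLast? = some p) (hinv : StInv dir p) (hsum : adjSum T = l - r)
    (d : Int × Int) :
    (∃ q, (bStep T d).getLast? = some q ∧ StInv (aStepD (r, l, dir) d).2.2 q) ∧
      adjSum (bStep T d) = (aStepD (r, l, dir) d).2.1 - (aStepD (r, l, dir) d).1 := by
  obtain ⟨d1, d2⟩ := d
  have hget : PySem.List.pyGet? T (-1) = some p := by
    rw [PySem.List.pyGet?_neg_one, hp]
  by_cases hu : isUnit (d1, d2) = true
  · have hd : ((d1, d2) = ((0:Int), (1:Int))) ∨ ((d1, d2) = ((1:Int), (0:Int))) ∨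
        ((d1, d2) = ((0:Int), (-1:Int))) ∨ ((d1, d2) = ((-1:Int), (0:Int))) := by
      simp only [isUnit, Bool.or_eq_true, beq_iff_eq] at hu
      tauto
    rcases hinv with hcase | hcase | hcase | hcase
    · -- current heading: right = (0, 1)
      obtain ⟨h1, h2⟩ := hcase
      subst h1; subst h2
      rcases hd with hd | hd | hd | hd <;> (injection hd with hx hy; subst hx; subst hy)
      · -- d = (0, 1): same axis, nothing happens
        have ha : aStepD (r, l, "right") (0, 1) = (r, l, "right") := by simp [aStepD]
        have hb : bStep T (0, 1) = T := by
          simp [bStep, isUnit, collapseStep, hget]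
        rw [ha, hb]
        exact ⟨⟨_, hp, Or.inl ⟨rfl, rfl⟩⟩, hsum⟩
      · -- d = (1, 0): turn
        have ha : aStepD (r, l, "right") (1, 0) = (r + 1, l, "down") := by simp [aStepD]
        have hb : bStep T (1, 0) = T ++ [(1, 0)] := by
          simp [bStep, isUnit, collapseStep, hget]
        rw [ha, hb]
        refine ⟨⟨(1, 0), by simp, Or.inr (Or.inl ⟨rfl, rfl⟩)⟩, ?_⟩
        rw [adjSum_append T _ hp, hsum]
        simp [bCross]
        try omega
      · -- d = (0, -1): same axis, nothing happens
        have ha : aStepD (r, l, "right") (0, -1) = (r, l, "right") := by simp [aStepD]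
        have hb : bStep T (0, -1) = T := by
          simp [bStep, isUnit, collapseStep, hget]
        rw [ha, hb]
        exact ⟨⟨_, hp, Or.inl ⟨rfl, rfl⟩⟩, hsum⟩
      · -- d = (-1, 0): turn
        have ha : aStepD (r, l, "right") (-1, 0) = (r, l + 1, "up") := by simp [aStepD]
        have hb : bStep T (-1, 0) = T ++ [(-1, 0)] := by
          simp [bStep, isUnit, collapseStep, hget]
        rw [ha, hb]
        refine ⟨⟨(-1, 0), by simp, Or.inr (Or.inr (Or.inr ⟨rfl, rfl⟩))⟩, ?_⟩
        rw [adjSum_append T _ hp, hsum]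
        simp [bCross]
        try omega
    · -- current heading: down = (1, 0)
      obtain ⟨h1, h2⟩ := hcase
      subst h1; subst h2
      rcases hd with hd | hd | hd | hd <;> (injection hd with hx hy; subst hx; subst hy)
      · -- d = (0, 1): turn
        have ha : aStepD (r, l, "down") (0, 1) = (r, l + 1, "right") := by simp [aStepD]
        have hb : bStep T (0, 1) = T ++ [(0, 1)] := by
          simp [bStep, isUnit, collapseStep, hget]
        rw [ha, hb]
        refine ⟨⟨(0, 1), by simp, Or.inl ⟨rfl, rfl⟩⟩, ?_⟩
        rw [adjSum_append T _ hp, hsum]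
        simp [bCross]
        try omega
      · -- d = (1, 0): same axis, nothing happens
        have ha : aStepD (r, l, "down") (1, 0) = (r, l, "down") := by simp [aStepD]
        have hb : bStep T (1, 0) = T := by
          simp [bStep, isUnit, collapseStep, hget]
        rw [ha, hb]
        exact ⟨⟨_, hp, Or.inr (Or.inl ⟨rfl, rfl⟩)⟩, hsum⟩
      · -- d = (0, -1): turn
        have ha : aStepD (r, l, "down") (0, -1) = (r + 1, l, "left") := by simp [aStepD]
        have hb : bStep T (0, -1) = T ++ [(0, -1)] := by
          simp [bStep, isUnit, collapseStep, hget]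
        rw [ha, hb]
        refine ⟨⟨(0, -1), by simp, Or.inr (Or.inr (Or.inl ⟨rfl, rfl⟩))⟩, ?_⟩
        rw [adjSum_append T _ hp, hsum]
        simp [bCross]
        try omega
      · -- d = (-1, 0): same axis, nothing happens
        have ha : aStepD (r, l, "down") (-1, 0) = (r, l, "down") := by simp [aStepD]
        have hb : bStep T (-1, 0) = T := by
          simp [bStep, isUnit, collapseStep, hget]
        rw [ha, hb]
        exact ⟨⟨_, hp, Or.inr (Or.inl ⟨rfl, rfl⟩)⟩, hsum⟩
    · -- current heading: left = (0, -1)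
      obtain ⟨h1, h2⟩ := hcase
      subst h1; subst h2
      rcases hd with hd | hd | hd | hd <;> (injection hd with hx hy; subst hx; subst hy)
      · -- d = (0, 1): same axis, nothing happens
        have ha : aStepD (r, l, "left") (0, 1) = (r, l, "left") := by simp [aStepD]
        have hb : bStep T (0, 1) = T := by
          simp [bStep, isUnit, collapseStep, hget]
        rw [ha, hb]
        exact ⟨⟨_, hp, Or.inr (Or.inr (Or.inl ⟨rfl, rfl⟩))⟩, hsum⟩
      · -- d = (1, 0): turn
        have ha : aStepD (r, l, "left") (1, 0) = (r, l + 1, "down") := by simp [aStepD]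
        have hb : bStep T (1, 0) = T ++ [(1, 0)] := by
          simp [bStep, isUnit, collapseStep, hget]
        rw [ha, hb]
        refine ⟨⟨(1, 0), by simp, Or.inr (Or.inl ⟨rfl, rfl⟩)⟩, ?_⟩
        rw [adjSum_append T _ hp, hsum]
        simp [bCross]
        try omega
      · -- d = (0, -1): same axis, nothing happens
        have ha : aStepD (r, l, "left") (0, -1) = (r, l, "left") := by simp [aStepD]
        have hb : bStep T (0, -1) = T := by
          simp [bStep, isUnit, collapseStep, hget]
        rw [ha, hb]
        exact ⟨⟨_, hp, Or.inr (Or.inr (Or.inl ⟨rfl, rfl⟩))⟩, hsum⟩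
      · -- d = (-1, 0): turn
        have ha : aStepD (r, l, "left") (-1, 0) = (r + 1, l, "up") := by simp [aStepD]
        have hb : bStep T (-1, 0) = T ++ [(-1, 0)] := by
          simp [bStep, isUnit, collapseStep, hget]
        rw [ha, hb]
        refine ⟨⟨(-1, 0), by simp, Or.inr (Or.inr (Or.inr ⟨rfl, rfl⟩))⟩, ?_⟩
        rw [adjSum_append T _ hp, hsum]
        simp [bCross]
        try omega
    · -- current heading: up = (-1, 0)
      obtain ⟨h1, h2⟩ := hcase
      subst h1; subst h2
      rcases hd with hd | hd | hd | hd <;> (injection hd with hx hy; subst hx; subst hy)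
      · -- d = (0, 1): turn
        have ha : aStepD (r, l, "up") (0, 1) = (r + 1, l, "right") := by simp [aStepD]
        have hb : bStep T (0, 1) = T ++ [(0, 1)] := by
          simp [bStep, isUnit, collapseStep, hget]
        rw [ha, hb]
        refine ⟨⟨(0, 1), by simp, Or.inl ⟨rfl, rfl⟩⟩, ?_⟩
        rw [adjSum_append T _ hp, hsum]
        simp [bCross]
        try omega
      · -- d = (1, 0): same axis, nothing happens
        have ha : aStepD (r, l, "up") (1, 0) = (r, l, "up") := by simp [aStepD]
        have hb : bStep T (1, 0) = T := by
          simp [bStep, isUnit, collapseStep, hget]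
        rw [ha, hb]
        exact ⟨⟨_, hp, Or.inr (Or.inr (Or.inr ⟨rfl, rfl⟩))⟩, hsum⟩
      · -- d = (0, -1): turn
        have ha : aStepD (r, l, "up") (0, -1) = (r, l + 1, "left") := by simp [aStepD]
        have hb : bStep T (0, -1) = T ++ [(0, -1)] := by
          simp [bStep, isUnit, collapseStep, hget]
        rw [ha, hb]
        refine ⟨⟨(0, -1), by simp, Or.inr (Or.inr (Or.inl ⟨rfl, rfl⟩))⟩, ?_⟩
        rw [adjSum_append T _ hp, hsum]
        simp [bCross]
        try omega
      · -- d = (-1, 0): same axis, nothing happens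
        have ha : aStepD (r, l, "up") (-1, 0) = (r, l, "up") := by simp [aStepD]
        have hb : bStep T (-1, 0) = T := by
          simp [bStep, isUnit, collapseStep, hget]
        rw [ha, hb]
        exact ⟨⟨_, hp, Or.inr (Or.inr (Or.inr ⟨rfl, rfl⟩))⟩, hsum⟩
  · have ha : aStepD (r, l, dir) (d1, d2) = (r, l, dir) := by
      simp only [isUnit, Bool.or_eq_true, beq_iff_eq] at hu
      push_neg at hu
      simp only [aStepD]
      split_ifs with h1 h2 h3 h4 h5 h6 h7 h8 <;> simp_all [Prod.ext_iff] <;> tauto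
    have hb : bStep T (d1, d2) = T := by simp [bStep, hu]
    rw [ha, hb]
    exact ⟨⟨p, hp, hinv⟩, hsum⟩

theorem fold_ok (ds : List (Int × Int)) :
    ∀ (r l : Int) (dir : String) (T : List (Int × Int)) (p : Int × Int),
    T.getLast? = some p → StInv dir p → adjSum T = l - r →
    adjSum (ds.foldl bStep T)
      = (ds.foldl aStepD (r, l, dir)).2.1 - (ds.foldl aStepD (r, l, dir)).1 := by
  induction ds with
  | nil => intro r l dir T p hp hinv hsum; simpa using hsum
  | cons d tl ih =>
    intro r l dir T p hp hinv hsum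
    obtain ⟨⟨q, hq, hinv'⟩, hsum'⟩ := step_ok r l dir T p hp hinv hsum d
    simp only [List.foldl_cons]
    rcases hs : aStepD (r, l, dir) d with ⟨a1, a2, a3⟩
    rw [hs] at hinv' hsum'
    exact ih a1 a2 a3 (bStep T d) q hq hinv' hsum'

theorem adjSum_eq_pairSum (T : List (Int × Int)) :
    ((List.zip T (PySem.List.slice T (some 1) none)).map (fun uv => bCross uv.1 uv.2)).sum
      = adjSum T := by
  rw [PySem.List.slice_from_one]
  induction T with
  | nil => rfl
  | cons u rest ih =>
    cases rest with
    | nil => rfl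
    | cons v rest' =>
      simp only [List.tail_cons, List.zip_cons_cons, List.map_cons, List.sum_cons, adjSum]
      rw [← ih]
      simp

theorem determine_side_spec : Claim_equal_determine_side := by
  intro lc _ hpre
  cases lc with
  | nil => exact absurd rfl hpre
  | cons hd t =>
    unfold Spec_determine_side determine_side determine_side_alt to_differences
    have hs1 : PySem.List.slice ((hd :: t) ++ [hd]) (some 1) none = ((hd :: t) ++ [hd]).tail :=
      PySem.List.slice_from_one _
    simp only [PySem.List.pyGet?_zero_cons, hs1]
    set ps := List.zip ((hd :: t) ++ [hd]) (((hd :: t) ++ [hd]).tail) with hps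
    -- A's fold over triples = fold of aStepD over the diff list
    have hA : (ps.map (fun pq => (pq.1, pq.2, (pq.2.1 - pq.1.1, pq.2.2 - pq.1.2)))).foldl
          aStep (0, 0, "right")
        = (ps.map (fun pq => (pq.2.1 - pq.1.1, pq.2.2 - pq.1.2))).foldl
          aStepD (0, 0, "right") := by
      rw [List.foldl_map, List.foldl_map]
      rfl
    -- B's fold over the filtered diffs = fold of bStep over the diff list
    have hB : ((ps.map (fun pq => (pq.2.1 - pq.1.1, pq.2.2 - pq.1.2))).filter isUnit).foldl
          collapseStep [((0 : Int), (1 : Int))]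
        = (ps.map (fun pq => (pq.2.1 - pq.1.1, pq.2.2 - pq.1.2))).foldl
          bStep [((0 : Int), (1 : Int))] := by
      rw [← PySem.List.foldl_if_eq_foldl_filter]
      rfl
    have hmain := fold_ok (ps.map (fun pq => (pq.2.1 - pq.1.1, pq.2.2 - pq.1.2)))
      0 0 "right" [((0 : Int), (1 : Int))] ((0 : Int), (1 : Int)) rfl
      (Or.inl ⟨rfl, rfl⟩) (by simp [adjSum])
    rw [hA, adjSum_eq_pairSum, hB, hmain]
    simp only [gt_iff_lt, sub_pos]
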